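-- pv_equiv track=rewrite | github.com/MrBrantCode/unitest_baseline | mut_generate/mist_train_taco/taco_11411/solution.py | minimum_headings_needed
-- ===== SOURCE A (Python) =====
-- import math
--
-- def minimum_headings_needed(s1: str, s2: str) -> int:
--     na = len(s1)
--     nb = len(s2)
--
--     # Create a DP table to store the next occurrence of each character in s1
--     dp = [[-1 for _ in range(26)] for _ in range(na + 1)]
--
--     # Fill the DP table
--     for i in range(na - 1, -1, -1):
--         for j in range(26):
--             dp[i][j] = dp[i + 1][j]
--         dp[i][ord(s1[i]) - 97] = i
--
--     cp = 0
--     ans = 1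
--     i = 0
--
--     while i < nb:
--         if cp == na:
--             ans += 1
--             cp = 0
--         if dp[cp][ord(s2[i]) - 97] == -1:
--             ans += 1
--             cp = 0
--             if dp[cp][ord(s2[i]) - 97] == -1:
--                 ans = math.inf
--                 break
--         cp = dp[cp][ord(s2[i]) - 97] + 1
--         i += 1
--
--     return ans if ans != math.inf else -1
-- ===== SOURCE B (Python) =====
-- def minimum_headings_needed(s1: str, s2: str) -> int:
--     chars = set(s1)
--     if any(c not in chars for c in s2):
--         return -1
--     ans = 1
--     j = 0
--     for c in s2:
--         p = s1.find(c, j)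
--         if p == -1:
--             ans += 1
--             p = s1.find(c)
--         j = p + 1
--     return ans
-- ===== Notes on version B (the rewrite author's own statement) =====
-- stated objective: simpler
-- what changed: Replaces the (na+1)x26 next-occurrence DP table and its infinity/break bookkeeping with an upfront membership check followed by a greedy two-pointer scan using str.find with a start index.
-- outside the precondition, e.g. on minimum_headings_needed('a', 'G'): A returns 1, B returns -1; on minimum_headings_needed('G', 'a'): A returns 1, B returns -1; on minimum_headings_needed('Ga', 'aa'): A returns 1, B returns 2
import Mathlib
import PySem

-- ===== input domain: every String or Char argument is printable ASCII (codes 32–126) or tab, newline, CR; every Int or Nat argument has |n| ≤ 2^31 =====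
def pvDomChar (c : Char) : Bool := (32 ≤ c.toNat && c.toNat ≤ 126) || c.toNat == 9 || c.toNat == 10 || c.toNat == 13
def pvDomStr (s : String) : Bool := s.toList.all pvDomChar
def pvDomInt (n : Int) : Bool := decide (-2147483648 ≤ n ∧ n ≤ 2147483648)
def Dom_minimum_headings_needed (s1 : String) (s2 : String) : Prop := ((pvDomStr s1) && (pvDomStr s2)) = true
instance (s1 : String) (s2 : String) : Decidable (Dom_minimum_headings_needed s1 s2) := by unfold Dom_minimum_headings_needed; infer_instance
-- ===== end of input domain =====

-- B replaces A's (na+1)x26 next-occurrence DP table (and its math.inf/break bookkeeping) with an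
-- upfront membership check plus a greedy two-pointer scan using str.find with a start index ('simpler').

-- ===== PORT A =====
-- ord(c) - 97
def pvCharIdx (c : Char) : Int := (c.toNat : Int) - 97

-- Python's dp[·][ord c - 97]: a negative index in -26..-1 wraps around (exact); below -26 Python
-- raises IndexError (outside Pre_), where .toNat clamps.
def pvWrap (i : Int) : Nat := (if i < 0 then i + 26 else i).toNat

-- the rows dp[p], dp[p+1], …, dp[na] of A's table, built (as in A) from the last row upwards:
-- row p = row (p+1) with entry (ord s1[p] - 97) set to p.
def pvBuildRows (cs : List Char) (p : Int) : List (List Int) :=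
  match cs with
  | [] => [List.replicate 26 (-1)]
  | c :: rest =>
    let tail := pvBuildRows rest (p + 1)
    ((tail.headD (List.replicate 26 (-1))).set (pvWrap (pvCharIdx c)) p) :: tail

-- dp[cp][ord c - 97]; exact on Pre_ where both indices are in range
def pvLookup (dp : List (List Int)) (cp : Int) (c : Char) : Int :=
  (dp.getD cp.toNat []).getD (pvWrap (pvCharIdx c)) (-1)

-- A's while loop; `none` models ans = math.inf followed by break
def pvLoopA (dp : List (List Int)) (na : Int) : List Char → Int → Int → Option Int
  | [], _, ans => some ans
  | c :: rest, cp, ans =>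
    let cp1 : Int := if cp = na then 0 else cp
    let ans1 : Int := if cp = na then ans + 1 else ans
    if pvLookup dp cp1 c = -1 then
      if pvLookup dp 0 c = -1 then none
      else pvLoopA dp na rest (pvLookup dp 0 c + 1) (ans1 + 1)
    else pvLoopA dp na rest (pvLookup dp cp1 c + 1) ans1

def minimum_headings_needed (s1 : String) (s2 : String) : Int :=
  let cs1 := s1.toList
  let na : Int := cs1.length
  let dp := pvBuildRows cs1 0
  match pvLoopA dp na s2.toList 0 1 with
  | some ans => ans
  | none => -1

-- ===== PORT B =====
-- B's for-loop over s2: j is the scan position in the current copy of s1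
def pvLoopB (s1 : String) : List Char → Int → Int → Int
  | [], _, ans => ans
  | c :: rest, j, ans =>
    let p := PySem.Str.findFrom s1 (String.singleton c) j
    if p = -1 then pvLoopB s1 rest (PySem.Str.find s1 (String.singleton c) + 1) (ans + 1)
    else pvLoopB s1 rest (p + 1) ans

def minimum_headings_needed_alt (s1 : String) (s2 : String) : Int :=
  let chars := PySem.Set.ofList s1.toList
  if s2.toList.any (fun c => !(PySem.Set.contains chars c)) then -1
  else pvLoopB s1 s2.toList 0 1

-- ===== PRECONDITION & SPEC =====
-- Pre_ admits (i) both strings lowercase a-z — the alphabet A's `ord(c) - 97` indexing assumes —,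
-- (ii) s2 empty with s1 in A's non-raising band (codes 71-122), (iii) s1 empty with s2 nonempty and
-- s2's first character in that band, and (iv) s1 in that band while s2's first character that is not
-- a band character of an alias class present in s1 exists and is a band character (its class is then
-- absent from s1 and both programs return -1 there).  Outside Pre_, A raises IndexError
-- for characters with code < 71 or > 122, and on remaining non-lowercase inputs returns accidental
-- values from Python's negative-index wraparound (aliasing 'G'..'`' with 'a'..'z').
-- the alias class Python's wrapped index puts a band character (code 71-122) into:
-- 'G'..'`' share a class with 'a'..'z' (26 classes)
def pvClass (c : Char) : Nat := (c.toNat - 71) % 26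

def Pre_minimum_headings_needed (s1 : String) (s2 : String) : Prop :=
  ((s1.toList.all fun c => 97 ≤ c.toNat && c.toNat ≤ 122) = true ∧
   (s2.toList.all fun c => 97 ≤ c.toNat && c.toNat ≤ 122) = true)
  ∨ ((s1.toList.all fun c => 71 ≤ c.toNat && c.toNat ≤ 122) = true ∧ s2 = "")
  ∨ (s1 = "" ∧ s2 ≠ "" ∧ 71 ≤ (s2.toList.headD 'a').toNat ∧ (s2.toList.headD 'a').toNat ≤ 122)
  ∨ ((s1.toList.all fun c => 71 ≤ c.toNat && c.toNat ≤ 122) = true ∧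
     (s2.toList.dropWhile fun c =>
        (71 ≤ c.toNat && c.toNat ≤ 122) && (s1.toList.any fun x => pvClass x == pvClass c)) ≠ [] ∧
     71 ≤ (((s2.toList.dropWhile fun c =>
        (71 ≤ c.toNat && c.toNat ≤ 122) && (s1.toList.any fun x => pvClass x == pvClass c))).headD 'a').toNat ∧
     (((s2.toList.dropWhile fun c =>
        (71 ≤ c.toNat && c.toNat ≤ 122) && (s1.toList.any fun x => pvClass x == pvClass c))).headD 'a').toNat ≤ 122)
instance (s1 : String) (s2 : String) : Decidable (Pre_minimum_headings_needed s1 s2) := by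
  unfold Pre_minimum_headings_needed; infer_instance

def pvWitness_minimum_headings_needed : String × String := ("ab", "bab")

def Spec_minimum_headings_needed (s1 : String) (s2 : String) (out : Int) : Prop := out = minimum_headings_needed_alt s1 s2
instance (s1 : String) (s2 : String) (out : Int) : Decidable (Spec_minimum_headings_needed s1 s2 out) := by unfold Spec_minimum_headings_needed; infer_instance

-- ===== CLAIM (what is proved, stated in full; the proofs are below) =====
def Claim_equal_minimum_headings_needed : Prop := ∀ (s1 : String) (s2 : String), Dom_minimum_headings_needed s1 s2 → Pre_minimum_headings_needed s1 s2 → Spec_minimum_headings_needed s1 s2 (minimum_headings_needed s1 s2)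

-- ===== LEMMAS AND PROOFS =====

theorem pv_toNat_inj (c c' : Char) (h : c.toNat = c'.toNat) : c = c' := by
  apply Char.ext; apply UInt32.toBitVec_inj.mp
  exact congrArg UInt32.toBitVec (UInt32.toNat_inj.mp h)

-- singleton-substring find is findIdx?
theorem pv_go_singleton (cs : List Char) (c : Char) (k : Nat) :
    PySem.Chars.find.go [c] cs k = match cs.findIdx? (· = c) with
      | none => -1 | some n => ((k + n : Nat) : Int) := by
  induction cs generalizing k with
  | nil => simp [PySem.Chars.find.go]
  | cons h t ih =>
    rw [PySem.Chars.find.go]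
    simp only [List.isPrefixOf, List.findIdx?_cons]
    by_cases hc : h = c
    · subst hc; simp
    · have h1 : (c == h) = false := by simp [Ne.symm hc]
      have h2 : (decide (h = c)) = false := by simp [hc]
      simp only [h1, h2, Bool.false_and]
      rw [ih]
      cases t.findIdx? (· = c) with
      | none => simp
      | some n => simp; ring

theorem pv_find_singleton (cs : List Char) (c : Char) :
    PySem.Chars.find cs [c] = match cs.findIdx? (· = c) with
      | none => -1 | some n => (n : Int) := by
  have := pv_go_singleton cs c 0
  simpa [PySem.Chars.find] using this

theorem pv_findFrom_singleton (cs : List Char) (c : Char) (k : Nat) (hk : k ≤ cs.length) :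
    PySem.Chars.findFrom cs [c] (k : Int) none =
      match (cs.drop k).findIdx? (· = c) with
      | none => -1 | some n => ((k + n : Nat) : Int) := by
  rw [PySem.Chars.findFrom_natCast cs [c] k hk, pv_find_singleton]
  cases (cs.drop k).findIdx? (· = c) with
  | none => simp
  | some n => simp

theorem pv_headD_mem {α : Type} (l : List α) (d : α) (h : l ≠ []) : l.headD d ∈ l := by
  cases l with
  | nil => exact absurd rfl h
  | cons a t => simp

theorem pv_rows_ne_nil (cs : List Char) (p : Int) : pvBuildRows cs p ≠ [] := by
  cases cs <;> simp [pvBuildRows]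

theorem pv_rows_len (cs : List Char) (p : Int) :
    ∀ row ∈ pvBuildRows cs p, row.length = 26 := by
  induction cs generalizing p with
  | nil => simp [pvBuildRows]
  | cons c rest ih =>
    intro row hrow
    simp only [pvBuildRows, List.mem_cons] at hrow
    rcases hrow with h | h
    · subst h
      rw [List.length_set]
      apply ih
      exact pv_headD_mem _ _ (pv_rows_ne_nil rest (p+1))
    · exact ih (p+1) row h

theorem pv_headD_eq_getD (cs : List Char) (p : Int) :
    (pvBuildRows cs p).headD (List.replicate 26 (-1)) = (pvBuildRows cs p).getD 0 [] := by
  cases h : pvBuildRows cs p with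
  | nil => exact absurd h (pv_rows_ne_nil cs p)
  | cons a l => simp

theorem pv_getD_replicate (i : Nat) : (List.replicate 26 (-1 : Int)).getD i (-1) = -1 := by
  rw [List.getD_eq_getElem?_getD]
  rcases Nat.lt_or_ge i 26 with h | h
  · rw [List.getElem?_replicate]
    simp [h]
  · rw [List.getElem?_eq_none (by simpa using h)]; rfl

theorem pv_findIdx?_bound {p : Char → Bool} (l : List Char) (n : Nat) (h : l.findIdx? p = some n) :
    n < l.length :=
  (List.findIdx?_eq_some_iff_findIdx_eq.mp h).1

theorem pv_findIdx?_some_of_any {p : Char → Bool} (l : List Char) (h : ∃ x ∈ l, p x = true) :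
    ∃ n, l.findIdx? p = some n := by
  have : (l.findIdx? p).isSome := by
    rw [List.findIdx?_isSome, List.any_eq_true]
    exact h
  exact Option.isSome_iff_exists.mp this

theorem pv_findIdx?_some_of_mem (l : List Char) (c : Char) (h : c ∈ l) :
    ∃ n, l.findIdx? (· = c) = some n :=
  pv_findIdx?_some_of_any l ⟨c, h, by simp⟩

theorem pv_findIdx?_none_of_not_mem (l : List Char) (c : Char) (h : c ∉ l) :
    l.findIdx? (· = c) = none := by
  rw [List.findIdx?_eq_none_iff]
  intro x hx
  simp
  rintro rfl
  exact h hx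

theorem pv_findIdx?_congr {p q : Char → Bool} (l : List Char) (h : ∀ x ∈ l, p x = q x) :
    l.findIdx? p = l.findIdx? q := by
  induction l with
  | nil => rfl
  | cons a t ih =>
    rw [List.findIdx?_cons, List.findIdx?_cons, h a (by simp),
        ih (fun x hx => h x (by simp [hx]))]

theorem pv_wrap_eq_class (c : Char) (hc : 71 ≤ c.toNat ∧ c.toNat ≤ 122) :
    pvWrap (pvCharIdx c) = pvClass c := by
  unfold pvWrap pvCharIdx pvClass
  by_cases h : (c.toNat : Int) - 97 < 0
  · rw [if_pos h]; omega
  · rw [if_neg h]; omega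

-- on lowercase characters the class test is plain equality
theorem pv_classEq_lower (x c : Char) (hx : 97 ≤ x.toNat ∧ x.toNat ≤ 122)
    (hc : 97 ≤ c.toNat ∧ c.toNat ≤ 122) :
    (pvClass x == pvClass c) = decide (x = c) := by
  by_cases h : x = c
  · subst h; simp
  · have hne : pvClass x ≠ pvClass c := by
      unfold pvClass
      intro heq
      exact h (pv_toNat_inj x c (by omega))
    simp [hne, h]

-- A's dp lookup is "first index ≥ k whose character shares c's alias class" (band characters)
theorem pv_lookup_core (cs : List Char) (c : Char) (p : Int) (k : Nat)
    (hcs : ∀ x ∈ cs, 71 ≤ x.toNat ∧ x.toNat ≤ 122) (hc : 71 ≤ c.toNat ∧ c.toNat ≤ 122)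
    (hk : k ≤ cs.length) :
    ((pvBuildRows cs p).getD k []).getD (pvWrap (pvCharIdx c)) (-1) =
      match (cs.drop k).findIdx? (fun x => pvClass x == pvClass c) with
      | none => -1 | some n => p + ((k + n : Nat) : Int) := by
  induction cs generalizing p k with
  | nil =>
    have hk0 : k = 0 := by simpa using hk
    subst hk0
    simp only [pvBuildRows, List.getD_cons_zero, List.drop_nil, List.findIdx?_nil]
    exact pv_getD_replicate _
  | cons c0 rest ih =>
    have hc0 := hcs c0 (by simp)
    have hrest : ∀ x ∈ rest, 71 ≤ x.toNat ∧ x.toNat ≤ 122 := fun x hx => hcs x (by simp [hx])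
    match k with
    | Nat.succ k' =>
      simp only [pvBuildRows, List.getD_cons_succ, List.drop_succ_cons]
      rw [ih (p+1) k' hrest (by simpa using hk)]
      cases (rest.drop k').findIdx? (fun x => pvClass x == pvClass c) with
      | none => rfl
      | some n => simp; ring
    | 0 =>
      simp only [pvBuildRows, List.getD_cons_zero, List.drop_zero, List.findIdx?_cons]
      have hlen : ((pvBuildRows rest (p + 1)).headD (List.replicate 26 (-1))).length = 26 :=
        pv_rows_len rest (p+1) _ (pv_headD_mem _ _ (pv_rows_ne_nil rest (p+1)))
      have hw : pvWrap (pvCharIdx c) = pvClass c := pv_wrap_eq_class c hc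
      have hw0 : pvWrap (pvCharIdx c0) = pvClass c0 := pv_wrap_eq_class c0 hc0
      by_cases hcc : pvClass c0 = pvClass c
      · have hwe : pvWrap (pvCharIdx c) = pvWrap (pvCharIdx c0) := by rw [hw, hw0, hcc]
        have : ((((pvBuildRows rest (p+1)).headD (List.replicate 26 (-1))).set (pvWrap (pvCharIdx c0)) p)).getD (pvWrap (pvCharIdx c0)) (-1) = p := by
          rw [List.getD_eq_getElem?_getD,
              List.getElem?_set_self (by rw [hlen, hw0]; unfold pvClass; omega)]
          simp
        rw [hwe, this]
        simp [hcc]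
      · have hne : pvWrap (pvCharIdx c) ≠ pvWrap (pvCharIdx c0) := by
          rw [hw, hw0]
          intro h
          exact hcc h.symm
        rw [List.getD_eq_getElem?_getD, List.getElem?_set_ne (Ne.symm hne), ← List.getD_eq_getElem?_getD,
            pv_headD_eq_getD, ih (p+1) 0 hrest (by simp)]
        have hdec : (pvClass c0 == pvClass c) = false := by simp [hcc]
        simp only [List.drop_zero, hdec]
        cases rest.findIdx? (fun x => pvClass x == pvClass c) with
        | none => rfl
        | some n => simp; ring

-- the two sides' lookups, in a common normal form (lowercase strings)
theorem pv_lookupA_eq (cs : List Char) (c : Char) (k : Nat)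
    (hcs : ∀ x ∈ cs, 97 ≤ x.toNat ∧ x.toNat ≤ 122) (hc : 97 ≤ c.toNat ∧ c.toNat ≤ 122)
    (hk : k ≤ cs.length) :
    pvLookup (pvBuildRows cs 0) (k : Int) c =
      match (cs.drop k).findIdx? (· = c) with
      | none => -1 | some n => ((k + n : Nat) : Int) := by
  unfold pvLookup
  simp only [Int.toNat_natCast]
  rw [pv_lookup_core cs c 0 k (fun x hx => ⟨by have := hcs x hx; omega, (hcs x hx).2⟩)
        ⟨by omega, hc.2⟩ hk]
  rw [pv_findIdx?_congr (cs.drop k)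
        (fun x hx => pv_classEq_lower x c (hcs x (List.mem_of_mem_drop hx)) hc)]
  cases (cs.drop k).findIdx? (· = c) with
  | none => rfl
  | some n => simp

-- band form of the same lookup
theorem pv_lookupW_eq (cs : List Char) (c : Char) (k : Nat)
    (hcs : ∀ x ∈ cs, 71 ≤ x.toNat ∧ x.toNat ≤ 122) (hc : 71 ≤ c.toNat ∧ c.toNat ≤ 122)
    (hk : k ≤ cs.length) :
    pvLookup (pvBuildRows cs 0) (k : Int) c =
      match (cs.drop k).findIdx? (fun x => pvClass x == pvClass c) with
      | none => -1 | some n => ((k + n : Nat) : Int) := by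
  unfold pvLookup
  simp only [Int.toNat_natCast]
  rw [pv_lookup_core cs c 0 k hcs hc hk]
  cases (cs.drop k).findIdx? (fun x => pvClass x == pvClass c) with
  | none => rfl
  | some n => simp

theorem pv_findFromB_eq (s1 : String) (c : Char) (k : Nat) (hk : k ≤ s1.toList.length) :
    PySem.Str.findFrom s1 (String.singleton c) (k : Int) =
      match (s1.toList.drop k).findIdx? (· = c) with
      | none => -1 | some n => ((k + n : Nat) : Int) := by
  rw [show PySem.Str.findFrom s1 (String.singleton c) (k : Int) =
        PySem.Chars.findFrom s1.toList [c] (k : Int) none by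
      simp [pysem]]
  exact pv_findFrom_singleton s1.toList c k hk

theorem pv_findB_eq (s1 : String) (c : Char) :
    PySem.Str.find s1 (String.singleton c) =
      match s1.toList.findIdx? (· = c) with
      | none => -1 | some n => (n : Int) := by
  rw [show PySem.Str.find s1 (String.singleton c) = PySem.Chars.find s1.toList [c] by simp [pysem]]
  exact pv_find_singleton s1.toList c


-- proof-only helpers: the common next scan position and copy-count increment for one character
def pvNextK (cs : List Char) (c : Char) (k : Nat) : Nat :=
  match (cs.drop k).findIdx? (· = c) with
  | some m => k + m + 1
  | none => match cs.findIdx? (· = c) with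
            | some n => n + 1
            | none => 0

def pvBump (cs : List Char) (c : Char) (k : Nat) : Int :=
  if (cs.drop k).findIdx? (· = c) = none then 1 else 0

theorem pv_nextK_le (cs : List Char) (c : Char) (k : Nat) (hk : k ≤ cs.length) (hcm : c ∈ cs) :
    pvNextK cs c k ≤ cs.length := by
  cases hm : (cs.drop k).findIdx? (· = c) with
  | some m =>
    have hb := pv_findIdx?_bound _ _ hm
    rw [List.length_drop] at hb
    simp only [pvNextK, hm]
    omega
  | none =>
    obtain ⟨n0, hn0⟩ := pv_findIdx?_some_of_mem cs c hcm
    have hb := pv_findIdx?_bound _ _ hn0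
    simp only [pvNextK, hm, hn0]
    omega

-- one step of A's loop, when c occurs in cs
theorem pv_stepA_present (cs : List Char) (rest : List Char) (c : Char) (k : Nat) (ans : Int)
    (hcs : ∀ x ∈ cs, 97 ≤ x.toNat ∧ x.toNat ≤ 122) (hc : 97 ≤ c.toNat ∧ c.toNat ≤ 122)
    (hk : k ≤ cs.length) (hcm : c ∈ cs) :
    pvLoopA (pvBuildRows cs 0) (cs.length : Int) (c :: rest) (k : Int) ans =
      pvLoopA (pvBuildRows cs 0) (cs.length : Int) rest ((pvNextK cs c k : Nat) : Int)
        (ans + pvBump cs c k) := by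
  obtain ⟨n0, hn0⟩ := pv_findIdx?_some_of_mem cs c hcm
  have hn0lt : n0 < cs.length := pv_findIdx?_bound _ _ hn0
  have hlk0 : pvLookup (pvBuildRows cs 0) (0 : Int) c = (n0 : Int) := by
    have := pv_lookupA_eq cs c 0 hcs hc (by omega)
    simpa [hn0] using this
  have h1 : ¬ ((n0 : Int) = -1) := by omega
  have e1 : ((n0 : Int) + 1) = ((n0 + 1 : Nat) : Int) := by push_cast; ring
  rw [pvLoopA]
  by_cases hkn : k = cs.length
  · subst hkn
    rw [if_pos rfl, if_pos rfl, hlk0, if_neg h1]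
    have hnx : pvNextK cs c cs.length = n0 + 1 := by
      simp [pvNextK, List.drop_length, hn0]
    have hbp : pvBump cs c cs.length = 1 := by
      simp [pvBump, List.drop_length]
    rw [hnx, hbp, e1]
  · have hkne : ¬ (((k : Nat) : Int) = ((cs.length : Nat) : Int)) := by
      intro h; exact hkn (by exact_mod_cast h)
    rw [if_neg hkne, if_neg hkne]
    cases hm : (cs.drop k).findIdx? (· = c) with
    | none =>
      have hlkk : pvLookup (pvBuildRows cs 0) ((k : Nat) : Int) c = -1 := by
        have := pv_lookupA_eq cs c k hcs hc hk
        simpa [hm] using this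
      rw [hlkk, if_pos rfl, hlk0, if_neg h1]
      have hnx : pvNextK cs c k = n0 + 1 := by simp [pvNextK, hm, hn0]
      have hbp : pvBump cs c k = 1 := by simp [pvBump, hm]
      rw [hnx, hbp, e1]
    | some m =>
      have hlkk : pvLookup (pvBuildRows cs 0) ((k : Nat) : Int) c = ((k + m : Nat) : Int) := by
        have := pv_lookupA_eq cs c k hcs hc hk
        simpa [hm] using this
      have h2 : ¬ (((k + m : Nat) : Int) = -1) := by push_cast; omega
      have e2 : (((k + m : Nat) : Int) + 1) = ((k + m + 1 : Nat) : Int) := by push_cast; ring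
      rw [hlkk, if_neg h2]
      have hnx : pvNextK cs c k = k + m + 1 := by simp [pvNextK, hm]
      have hbp : pvBump cs c k = 0 := by simp [pvBump, hm]
      rw [hnx, hbp, e2, add_zero]

-- one step of A's loop, when c does not occur in cs: math.inf is reached
theorem pv_stepA_absent (cs : List Char) (rest : List Char) (c : Char) (k : Nat) (ans : Int)
    (hcs : ∀ x ∈ cs, 97 ≤ x.toNat ∧ x.toNat ≤ 122) (hc : 97 ≤ c.toNat ∧ c.toNat ≤ 122)
    (hk : k ≤ cs.length) (hcm : c ∉ cs) :
    pvLoopA (pvBuildRows cs 0) (cs.length : Int) (c :: rest) (k : Int) ans = none := by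
  have hlook : ∀ (j : Nat), j ≤ cs.length →
      pvLookup (pvBuildRows cs 0) ((j : Nat) : Int) c = -1 := by
    intro j hj
    rw [pv_lookupA_eq cs c j hcs hc hj]
    have : (cs.drop j).findIdx? (· = c) = none := by
      apply pv_findIdx?_none_of_not_mem
      intro hmem
      exact hcm (List.mem_of_mem_drop hmem)
    simp [this]
  have hlook0 : pvLookup (pvBuildRows cs 0) (0 : Int) c = -1 := by
    have := hlook 0 (by omega)
    simpa using this
  rw [pvLoopA]
  by_cases hkn : k = cs.length
  · subst hkn
    rw [if_pos rfl, hlook0, if_pos rfl, if_pos rfl]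
  · have hkne : ¬ (((k : Nat) : Int) = ((cs.length : Nat) : Int)) := by
      intro h; exact hkn (by exact_mod_cast h)
    rw [if_neg hkne, hlook k hk, if_pos rfl, hlook0, if_pos rfl]

-- one step of B's loop, when c occurs in s1
theorem pv_stepB_present (s1 : String) (rest : List Char) (c : Char) (k : Nat) (ans : Int)
    (hk : k ≤ s1.toList.length) (hcm : c ∈ s1.toList) :
    pvLoopB s1 (c :: rest) (k : Int) ans =
      pvLoopB s1 rest ((pvNextK s1.toList c k : Nat) : Int) (ans + pvBump s1.toList c k) := by
  obtain ⟨n0, hn0⟩ := pv_findIdx?_some_of_mem s1.toList c hcm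
  have h1 : ¬ ((n0 : Int) = -1) := by omega
  have e1 : ((n0 : Int) + 1) = ((n0 + 1 : Nat) : Int) := by push_cast; ring
  have hf0 : PySem.Str.find s1 (String.singleton c) = (n0 : Int) := by
    rw [pv_findB_eq]; simp [hn0]
  rw [pvLoopB]
  cases hm : (s1.toList.drop k).findIdx? (· = c) with
  | none =>
    have hff : PySem.Str.findFrom s1 (String.singleton c) ((k : Nat) : Int) = -1 := by
      rw [pv_findFromB_eq s1 c k hk]; simp [hm]
    rw [hff, if_pos rfl, hf0]
    have hnx : pvNextK s1.toList c k = n0 + 1 := by simp [pvNextK, hm, hn0]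
    have hbp : pvBump s1.toList c k = 1 := by simp [pvBump, hm]
    rw [hnx, hbp, e1]
  | some m =>
    have hff : PySem.Str.findFrom s1 (String.singleton c) ((k : Nat) : Int) = ((k + m : Nat) : Int) := by
      rw [pv_findFromB_eq s1 c k hk]; simp [hm]
    have h2 : ¬ (((k + m : Nat) : Int) = -1) := by push_cast; omega
    have e2 : (((k + m : Nat) : Int) + 1) = ((k + m + 1 : Nat) : Int) := by push_cast; ring
    rw [hff, if_neg h2]
    have hnx : pvNextK s1.toList c k = k + m + 1 := by simp [pvNextK, hm]
    have hbp : pvBump s1.toList c k = 0 := by simp [pvBump, hm]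
    rw [hnx, hbp, e2, add_zero]

-- class-level analogues, for band strings where some class of s2 is absent from s1
def pvNextKW (cs : List Char) (c : Char) (k : Nat) : Nat :=
  match (cs.drop k).findIdx? (fun x => pvClass x == pvClass c) with
  | some m => k + m + 1
  | none => match cs.findIdx? (fun x => pvClass x == pvClass c) with
            | some n => n + 1
            | none => 0

def pvBumpW (cs : List Char) (c : Char) (k : Nat) : Int :=
  if (cs.drop k).findIdx? (fun x => pvClass x == pvClass c) = none then 1 else 0

theorem pv_nextKW_le (cs : List Char) (c : Char) (k : Nat) (hk : k ≤ cs.length)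
    (hcm : ∃ x ∈ cs, (pvClass x == pvClass c) = true) :
    pvNextKW cs c k ≤ cs.length := by
  cases hm : (cs.drop k).findIdx? (fun x => pvClass x == pvClass c) with
  | some m =>
    have hb := pv_findIdx?_bound _ _ hm
    rw [List.length_drop] at hb
    simp only [pvNextKW, hm]
    omega
  | none =>
    obtain ⟨n0, hn0⟩ := pv_findIdx?_some_of_any cs hcm
    have hb := pv_findIdx?_bound _ _ hn0
    simp only [pvNextKW, hm, hn0]
    omega

theorem pv_stepAW_present (cs : List Char) (rest : List Char) (c : Char) (k : Nat) (ans : Int)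
    (hcs : ∀ x ∈ cs, 71 ≤ x.toNat ∧ x.toNat ≤ 122) (hc : 71 ≤ c.toNat ∧ c.toNat ≤ 122)
    (hk : k ≤ cs.length) (hcm : ∃ x ∈ cs, (pvClass x == pvClass c) = true) :
    pvLoopA (pvBuildRows cs 0) (cs.length : Int) (c :: rest) (k : Int) ans =
      pvLoopA (pvBuildRows cs 0) (cs.length : Int) rest ((pvNextKW cs c k : Nat) : Int)
        (ans + pvBumpW cs c k) := by
  obtain ⟨n0, hn0⟩ := pv_findIdx?_some_of_any cs hcm
  have hn0lt : n0 < cs.length := pv_findIdx?_bound _ _ hn0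
  have hlk0 : pvLookup (pvBuildRows cs 0) (0 : Int) c = (n0 : Int) := by
    have := pv_lookupW_eq cs c 0 hcs hc (by omega)
    simpa [hn0] using this
  have h1 : ¬ ((n0 : Int) = -1) := by omega
  have e1 : ((n0 : Int) + 1) = ((n0 + 1 : Nat) : Int) := by push_cast; ring
  rw [pvLoopA]
  by_cases hkn : k = cs.length
  · subst hkn
    rw [if_pos rfl, if_pos rfl, hlk0, if_neg h1]
    have hnx : pvNextKW cs c cs.length = n0 + 1 := by
      simp [pvNextKW, List.drop_length, hn0]
    have hbp : pvBumpW cs c cs.length = 1 := by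
      simp [pvBumpW, List.drop_length]
    rw [hnx, hbp, e1]
  · have hkne : ¬ (((k : Nat) : Int) = ((cs.length : Nat) : Int)) := by
      intro h; exact hkn (by exact_mod_cast h)
    rw [if_neg hkne, if_neg hkne]
    cases hm : (cs.drop k).findIdx? (fun x => pvClass x == pvClass c) with
    | none =>
      have hlkk : pvLookup (pvBuildRows cs 0) ((k : Nat) : Int) c = -1 := by
        have := pv_lookupW_eq cs c k hcs hc hk
        simpa [hm] using this
      rw [hlkk, if_pos rfl, hlk0, if_neg h1]
      have hnx : pvNextKW cs c k = n0 + 1 := by simp [pvNextKW, hm, hn0]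
      have hbp : pvBumpW cs c k = 1 := by simp [pvBumpW, hm]
      rw [hnx, hbp, e1]
    | some m =>
      have hlkk : pvLookup (pvBuildRows cs 0) ((k : Nat) : Int) c = ((k + m : Nat) : Int) := by
        have := pv_lookupW_eq cs c k hcs hc hk
        simpa [hm] using this
      have h2 : ¬ (((k + m : Nat) : Int) = -1) := by push_cast; omega
      have e2 : (((k + m : Nat) : Int) + 1) = ((k + m + 1 : Nat) : Int) := by push_cast; ring
      rw [hlkk, if_neg h2]
      have hnx : pvNextKW cs c k = k + m + 1 := by simp [pvNextKW, hm]
      have hbp : pvBumpW cs c k = 0 := by simp [pvBumpW, hm]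
      rw [hnx, hbp, e2, add_zero]

theorem pv_stepAW_absent (cs : List Char) (rest : List Char) (c : Char) (k : Nat) (ans : Int)
    (hcs : ∀ x ∈ cs, 71 ≤ x.toNat ∧ x.toNat ≤ 122) (hc : 71 ≤ c.toNat ∧ c.toNat ≤ 122)
    (hk : k ≤ cs.length) (hcm : ∀ x ∈ cs, (pvClass x == pvClass c) = false) :
    pvLoopA (pvBuildRows cs 0) (cs.length : Int) (c :: rest) (k : Int) ans = none := by
  have hlook : ∀ (j : Nat), j ≤ cs.length →
      pvLookup (pvBuildRows cs 0) ((j : Nat) : Int) c = -1 := by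
    intro j hj
    rw [pv_lookupW_eq cs c j hcs hc hj]
    have : (cs.drop j).findIdx? (fun x => pvClass x == pvClass c) = none := by
      rw [List.findIdx?_eq_none_iff]
      intro x hx
      exact hcm x (List.mem_of_mem_drop hx)
    simp [this]
  have hlook0 : pvLookup (pvBuildRows cs 0) (0 : Int) c = -1 := by
    have := hlook 0 (by omega)
    simpa using this
  rw [pvLoopA]
  by_cases hkn : k = cs.length
  · subst hkn
    rw [if_pos rfl, hlook0, if_pos rfl, if_pos rfl]
  · have hkne : ¬ (((k : Nat) : Int) = ((cs.length : Nat) : Int)) := by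
      intro h; exact hkn (by exact_mod_cast h)
    rw [if_neg hkne, hlook k hk, if_pos rfl, hlook0, if_pos rfl]

-- A's loop reaches math.inf at the first character whose class is absent from s1, whatever follows
theorem pv_loops_prefix_absent (cs : List Char) (pre rest : List Char) (c : Char) (k : Nat) (ans : Int)
    (hcs : ∀ x ∈ cs, 71 ≤ x.toNat ∧ x.toNat ≤ 122)
    (hp : ∀ x ∈ pre, (71 ≤ x.toNat ∧ x.toNat ≤ 122) ∧ ∃ y ∈ cs, (pvClass y == pvClass x) = true)
    (hc : 71 ≤ c.toNat ∧ c.toNat ≤ 122) (hk : k ≤ cs.length)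
    (hcabs : ∀ x ∈ cs, (pvClass x == pvClass c) = false) :
    pvLoopA (pvBuildRows cs 0) (cs.length : Int) (pre ++ c :: rest) (k : Int) ans = none := by
  induction pre generalizing k ans with
  | nil => exact pv_stepAW_absent cs rest c k ans hcs hc hk hcabs
  | cons a p' ih =>
    obtain ⟨ha, hapres⟩ := hp a (by simp)
    have hp' : ∀ x ∈ p', (71 ≤ x.toNat ∧ x.toNat ≤ 122) ∧ ∃ y ∈ cs, (pvClass y == pvClass x) = true :=
      fun x hx => hp x (by simp [hx])
    rw [List.cons_append, pv_stepAW_present cs (p' ++ c :: rest) a k ans hcs ha hk hapres]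
    exact ih (pvNextKW cs a k) (ans + pvBumpW cs a k) hp' (pv_nextKW_le cs a k hk hapres)

-- the two loops agree when every remaining character occurs in s1
theorem pv_loops_eq (s1 : String) (chars : List Char) (k : Nat) (ans : Int)
    (hs1 : ∀ x ∈ s1.toList, 97 ≤ x.toNat ∧ x.toNat ≤ 122) (hch : ∀ x ∈ chars, 97 ≤ x.toNat ∧ x.toNat ≤ 122)
    (hk : k ≤ s1.toList.length) (hpres : ∀ x ∈ chars, x ∈ s1.toList) :
    pvLoopA (pvBuildRows s1.toList 0) (s1.toList.length : Int) chars (k : Int) ans =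
      some (pvLoopB s1 chars (k : Int) ans) := by
  induction chars generalizing k ans with
  | nil => simp [pvLoopA, pvLoopB]
  | cons c rest ih =>
    have hc : 97 ≤ c.toNat ∧ c.toNat ≤ 122 := hch c (by simp)
    have hcm : c ∈ s1.toList := hpres c (by simp)
    have hrest : ∀ x ∈ rest, 97 ≤ x.toNat ∧ x.toNat ≤ 122 := fun x hx => hch x (by simp [hx])
    have hpres' : ∀ x ∈ rest, x ∈ s1.toList := fun x hx => hpres x (by simp [hx])
    rw [pv_stepA_present s1.toList rest c k ans hs1 hc hk hcm,
        pv_stepB_present s1 rest c k ans hk hcm]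
    exact ih (pvNextK s1.toList c k) (ans + pvBump s1.toList c k) hrest
      (pv_nextK_le s1.toList c k hk hcm) hpres'

-- A's loop reaches math.inf when some remaining character never occurs in s1
theorem pv_loops_absent (s1 : String) (chars : List Char) (k : Nat) (ans : Int)
    (hs1 : ∀ x ∈ s1.toList, 97 ≤ x.toNat ∧ x.toNat ≤ 122) (hch : ∀ x ∈ chars, 97 ≤ x.toNat ∧ x.toNat ≤ 122)
    (hk : k ≤ s1.toList.length) (habs : ∃ x ∈ chars, x ∉ s1.toList) :
    pvLoopA (pvBuildRows s1.toList 0) (s1.toList.length : Int) chars (k : Int) ans = none := by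
  induction chars generalizing k ans with
  | nil => simp at habs
  | cons c rest ih =>
    have hc : 97 ≤ c.toNat ∧ c.toNat ≤ 122 := hch c (by simp)
    have hrest : ∀ x ∈ rest, 97 ≤ x.toNat ∧ x.toNat ≤ 122 := fun x hx => hch x (by simp [hx])
    by_cases hcm : c ∈ s1.toList
    · have habs' : ∃ x ∈ rest, x ∉ s1.toList := by
        rcases habs with ⟨x, hx, hxn⟩
        rcases List.mem_cons.mp hx with rfl | hx'
        · exact absurd hcm hxn
        · exact ⟨x, hx', hxn⟩
      rw [pv_stepA_present s1.toList rest c k ans hs1 hc hk hcm]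
      exact ih (pvNextK s1.toList c k) (ans + pvBump s1.toList c k) hrest
        (pv_nextK_le s1.toList c k hk hcm) habs'
    · exact pv_stepA_absent s1.toList rest c k ans hs1 hc hk hcm

-- ===== VERDICT (by name: the statement is the Claim_ definition above) =====
theorem minimum_headings_needed_spec : Claim_equal_minimum_headings_needed := by
  intro s1 s2 _hdom hpre
  unfold Spec_minimum_headings_needed
  rcases hpre with ⟨hb1, hb2⟩ | ⟨_hb1, hb2⟩ | ⟨hb1, hb2, hb3⟩ | hb2
  case inr.inr.inr =>
    -- s1 in the band; s2's first character that is not a present-class band character is a band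
    -- character with class absent from s1: both programs return -1
    obtain ⟨hb1, hb2, hb3, hb4⟩ := hb2
    have h1 : ∀ x ∈ s1.toList, 71 ≤ x.toNat ∧ x.toNat ≤ 122 := by
      simpa [List.all_eq_true] using hb1
    set pred : Char → Bool :=
      fun c => (71 ≤ c.toNat && c.toNat ≤ 122) && (s1.toList.any fun x => pvClass x == pvClass c)
      with hpred
    cases hr : s2.toList.dropWhile pred with
    | nil => exact absurd hr hb2
    | cons c rest =>
      have hsplit : s2.toList.takeWhile pred ++ c :: rest = s2.toList := by
        rw [← hr]; exact List.takeWhile_append_dropWhile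
      have hcband : 71 ≤ c.toNat ∧ c.toNat ≤ 122 := by
        rw [hr] at hb3 hb4
        exact ⟨by simpa using hb3, by simpa using hb4⟩
      have hcfail : pred c = false := by
        have := List.head_dropWhile_not pred (by rw [hr]; simp : s2.toList.dropWhile pred ≠ [])
        simpa [hr] using this
      have hcabs : ∀ x ∈ s1.toList, (pvClass x == pvClass c) = false := by
        have hany : (s1.toList.any fun x => pvClass x == pvClass c) = false := by
          cases hq : (s1.toList.any fun x => pvClass x == pvClass c) with
          | false => rfl
          | true =>
            exfalso
            rw [hpred] at hcfail
            simp [hq, hcband.1, hcband.2] at hcfail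
        intro x hx
        simpa using List.any_eq_false.mp hany x hx
      have hp : ∀ x ∈ s2.toList.takeWhile pred,
          (71 ≤ x.toNat ∧ x.toNat ≤ 122) ∧ ∃ y ∈ s1.toList, (pvClass y == pvClass x) = true := by
        intro x hx
        have hpx := List.mem_takeWhile_imp hx
        rw [hpred] at hpx
        simp only [Bool.and_eq_true, decide_eq_true_eq] at hpx
        exact ⟨hpx.1, List.any_eq_true.mp hpx.2⟩
      have hA := pv_loops_prefix_absent s1.toList (s2.toList.takeWhile pred) rest c 0 1
        h1 hp hcband (by omega) hcabs
      rw [Nat.cast_zero, hsplit] at hA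
      have hcmem : c ∈ s2.toList := by
        rw [← hsplit]; simp
      have hany : (s2.toList.any fun x => !(PySem.Set.ofList s1.toList).contains x) = true := by
        rw [List.any_eq_true]
        refine ⟨c, hcmem, ?_⟩
        have hcn : c ∉ s1.toList := by
          intro hcs1
          have := hcabs c hcs1
          simp at this
        simp [PySem.Set.mem_ofList, hcn]
      simp only [minimum_headings_needed, minimum_headings_needed_alt, hA, hany, if_true]
  case inr.inl =>
    -- s2 is empty: A returns its initial ans = 1, B's loop body never runs
    subst hb2
    simp [minimum_headings_needed, minimum_headings_needed_alt, pvLoopA, pvLoopB]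
  case inr.inr.inl =>
    -- s1 is empty: A's all-(-1) row sends ans to math.inf on s2's first character, B sees it absent
    subst hb1
    have h0 : ("" : String).toList = ([] : List Char) := rfl
    cases hne : s2.toList with
    | nil =>
      exact absurd (String.toList_inj.mp (by rw [hne]; rfl)) hb2
    | cons c rest =>
      have hlk0 : pvLookup (pvBuildRows [] 0) 0 c = -1 := by
        simp only [pvLookup, pvBuildRows, Int.toNat_zero, List.getD_cons_zero]
        exact pv_getD_replicate _
      have hA : pvLoopA (pvBuildRows [] 0) (0 : Int) (c :: rest) 0 1 = none := by
        rw [pvLoopA]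
        simp [hlk0]
      simp [minimum_headings_needed, minimum_headings_needed_alt, h0, hne, hA,
            PySem.Set.ofList, PySem.Set.contains]
  have h1 : ∀ c ∈ s1.toList, 97 ≤ c.toNat ∧ c.toNat ≤ 122 := by
    simpa [List.all_eq_true] using hb1
  have h2 : ∀ c ∈ s2.toList, 97 ≤ c.toNat ∧ c.toNat ≤ 122 := by
    simpa [List.all_eq_true] using hb2
  simp only [minimum_headings_needed, minimum_headings_needed_alt]
  by_cases habs : ∃ x ∈ s2.toList, x ∉ s1.toList
  · have hany : (s2.toList.any fun c => !(PySem.Set.ofList s1.toList).contains c) = true := by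
      rcases habs with ⟨x, hx, hxn⟩
      rw [List.any_eq_true]
      refine ⟨x, hx, ?_⟩
      simp [PySem.Set.mem_ofList, hxn]
    have hA := pv_loops_absent s1 s2.toList 0 1 h1 h2 (by omega) habs
    rw [Nat.cast_zero] at hA
    simp only [hA, hany, if_true]
  · have hpres : ∀ x ∈ s2.toList, x ∈ s1.toList := by
      intro x hx
      by_contra hxn
      exact habs ⟨x, hx, hxn⟩
    have hany : (s2.toList.any fun c => !(PySem.Set.ofList s1.toList).contains c) = false := by
      rw [List.any_eq_false]
      intro x hx
      simp [PySem.Set.mem_ofList]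
      exact hpres x hx
    have hB := pv_loops_eq s1 s2.toList 0 1 h1 h2 (by omega) hpres
    rw [Nat.cast_zero] at hB
    simp only [hB, hany, if_false, Bool.false_eq_true]
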